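-- pv_equiv track=rewrite | github.com/Christine8888/researchbench | utils/improved_mask_numerical_values.py | generate_comma_patterns
-- ===== SOURCE A (Python) =====
-- from typing import List, Dict, Any, Union, Tuple, Optional
--
-- def generate_comma_patterns(value: int) -> List[str]:
--     """
--     Generate patterns for comma-separated representation of large integers.
--
--     Args:
--         value: Integer value to generate patterns for
--
--     Returns:
--         List of regex patterns for different comma placements
--     """
--     patterns = []
--     str_value = str(value)
--
--     # Skip for small numbers
--     if value < 1000:
--         return patterns
--
--     # Handle standard comma formatting (every 3 digits from right)
--     formatted = ""
--     for i, digit in enumerate(str_value[::-1]):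
--         if i > 0 and i % 3 == 0:
--             formatted = ',' + formatted
--         formatted = digit + formatted
--
--     patterns.append(r'\b{}\b'.format(formatted))
--
--     return patterns
-- ===== SOURCE B (Python) =====
-- def generate_comma_patterns(value: int):
--     """Same result as A; builds the comma form by chunking three-digit groups
--     from the right instead of a per-digit reverse loop."""
--     if value < 1000:
--         return []
--     s = str(value)
--     chunks = []
--     while len(s) > 3:
--         chunks.append(s[-3:])
--         s = s[:-3]
--     chunks.append(s)
--     formatted = ','.join(reversed(chunks))
--     return ['\\b{}\\b'.format(formatted)]
-- ===== Notes on version B (the rewrite author's own statement) =====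
-- stated objective: simpler
-- what changed: Replaces A's per-digit reverse enumerate loop with index arithmetic (i % 3) by a while loop that chunks the decimal string into three-digit groups from the right and joins the reversed chunks with commas.
import Mathlib
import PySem

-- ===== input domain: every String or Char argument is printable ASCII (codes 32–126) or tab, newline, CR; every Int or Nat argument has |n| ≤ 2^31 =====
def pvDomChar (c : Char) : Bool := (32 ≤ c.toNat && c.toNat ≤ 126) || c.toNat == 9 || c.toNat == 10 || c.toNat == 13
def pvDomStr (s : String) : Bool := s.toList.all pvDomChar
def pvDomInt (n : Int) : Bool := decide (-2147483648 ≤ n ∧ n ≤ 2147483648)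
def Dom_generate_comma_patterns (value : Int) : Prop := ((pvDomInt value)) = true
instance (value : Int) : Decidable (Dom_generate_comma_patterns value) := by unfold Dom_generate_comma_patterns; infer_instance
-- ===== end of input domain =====

-- B replaces A's per-digit reverse loop (comma when i % 3 == 0) by chunking the
-- decimal string into three-digit groups from the right and joining the reversed
-- chunks with commas: same value, a plainer decomposition.

-- ===== PORT A =====
def generate_comma_patterns (value : Int) : List String :=
  let patterns : List String := []
  let str_value := PySem.Int.toStr value
  if value < 1000 then patterns
  else
    -- str_value[::-1] is the reverse (PySem.Str.slice?_none_none_neg_one)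
    let formatted : List Char :=
      (PySem.List.enumerate str_value.toList.reverse 0).foldl
        (fun formatted ic =>
          let formatted := if ic.1 > 0 ∧ PySem.Int.mod ic.1 3 = 0 then ',' :: formatted else formatted
          ic.2 :: formatted) []
    patterns ++ [String.ofList ('\\' :: 'b' :: formatted ++ ['\\', 'b'])]

-- ===== PORT B =====
-- the 'while len(s) > 3' loop of Source B: s[-3:] = drop (len-3), s[:-3] = take (len-3)
def pvChunksB (s : List Char) : List (List Char) :=
  if s.length > 3 then
    s.drop (s.length - 3) :: pvChunksB (s.take (s.length - 3))
  else [s]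
termination_by s.length
decreasing_by simp [List.length_take]; omega

def generate_comma_patterns_alt (value : Int) : List String :=
  if value < 1000 then []
  else
    let s := (PySem.Int.toStr value).toList
    -- ','.join(reversed(chunks))
    let formatted := List.intercalate [','] (pvChunksB s).reverse
    [String.ofList ('\\' :: 'b' :: formatted ++ ['\\', 'b'])]

-- ===== PRECONDITION & SPEC =====
def Spec_generate_comma_patterns (value : Int) (out : List String) : Prop := out = generate_comma_patterns_alt value
instance (value : Int) (out : List String) : Decidable (Spec_generate_comma_patterns value out) := by unfold Spec_generate_comma_patterns; infer_instance

-- ===== CLAIM (what is proved, stated in full; the proofs are below) =====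
def Claim_equal_generate_comma_patterns : Prop := ∀ (value : Int), Dom_generate_comma_patterns value → Spec_generate_comma_patterns value (generate_comma_patterns value)

-- ===== LEMMAS AND PROOFS =====

-- A's loop body (the inline lambda of the port), and its variant with the 'i > 0' test dropped
def pvStepA (acc : List Char) (ic : Int × Char) : List Char :=
  ic.2 :: (if ic.1 > 0 ∧ PySem.Int.mod ic.1 3 = 0 then ',' :: acc else acc)

def pvStep0 (acc : List Char) (ic : Int × Char) : List Char :=
  ic.2 :: (if PySem.Int.mod ic.1 3 = 0 then ',' :: acc else acc)

theorem pv_mod3 (k : Int) : PySem.Int.mod k 3 = k % 3 :=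
  PySem.Int.mod_eq_emod_of_pos (by norm_num)

theorem pvStepA_out : ∀ (l : List (Int × Char)) (acc : List Char),
    l.foldl pvStepA acc = l.foldl pvStepA [] ++ acc := by
  intro l
  induction l with
  | nil => simp
  | cons x t ih =>
    intro acc
    simp only [List.foldl_cons]
    rw [ih, ih (pvStepA [] x)]
    have h : pvStepA acc x = pvStepA [] x ++ acc := by
      unfold pvStepA; split_ifs <;> simp
    rw [h, List.append_assoc]

theorem pvStep0_out : ∀ (l : List (Int × Char)) (acc : List Char),
    l.foldl pvStep0 acc = l.foldl pvStep0 [] ++ acc := by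
  intro l
  induction l with
  | nil => simp
  | cons x t ih =>
    intro acc
    simp only [List.foldl_cons]
    rw [ih, ih (pvStep0 [] x)]
    have h : pvStep0 acc x = pvStep0 [] x ++ acc := by
      unfold pvStep0; split_ifs <;> simp
    rw [h, List.append_assoc]

theorem pv_shift : ∀ (t : List Char) (acc : List Char) (k : Int), 0 ≤ k →
    (PySem.List.enumerate t (k + 3)).foldl pvStepA acc
      = (PySem.List.enumerate t k).foldl pvStep0 acc := by
  intro t
  induction t with
  | nil => simp [PySem.List.enumerate_nil]
  | cons x t ih =>
    intro acc k hk
    rw [PySem.List.enumerate_cons, PySem.List.enumerate_cons]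
    simp only [List.foldl_cons]
    have hstep : pvStepA acc (k + 3, x) = pvStep0 acc (k, x) := by
      unfold pvStepA pvStep0
      simp only [pv_mod3]
      have : (k + 3 > 0 ∧ (k + 3) % 3 = 0) ↔ k % 3 = 0 := by omega
      split_ifs with h1 h2 h2 <;> first | rfl | (exact absurd (this.mp h1) h2) | (exact absurd (this.mpr h2) h1)
    rw [hstep, show k + 3 + 1 = (k + 1) + 3 by ring, ih _ (k + 1) (by omega)]

theorem pv_ge1 : ∀ (t : List Char) (acc : List Char) (k : Int), 1 ≤ k →
    (PySem.List.enumerate t k).foldl pvStep0 acc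
      = (PySem.List.enumerate t k).foldl pvStepA acc := by
  intro t
  induction t with
  | nil => simp
  | cons x t ih =>
    intro acc k hk
    rw [PySem.List.enumerate_cons]
    simp only [List.foldl_cons]
    have hstep : pvStep0 acc (k, x) = pvStepA acc (k, x) := by
      unfold pvStepA pvStep0
      have : (k > 0 ∧ PySem.Int.mod k 3 = 0) ↔ PySem.Int.mod k 3 = 0 := by
        constructor
        · exact fun h => h.2
        · exact fun h => ⟨by omega, h⟩
      split_ifs with h1 h2 h2 <;> first | rfl | (exact absurd (this.mpr h1) h2) | (exact absurd (this.mp h2) h1)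
    rw [hstep, ih _ (k + 1) (by omega)]

def pvFA (r : List Char) : List Char := (PySem.List.enumerate r 0).foldl pvStepA []

theorem pvChunksB_ne_nil (s : List Char) : pvChunksB s ≠ [] := by
  rw [pvChunksB]; split <;> simp

theorem pv_intercalate_cons_cons {α : Type} (sep x y : List α) (t : List (List α)) :
    List.intercalate sep (x :: y :: t) = x ++ sep ++ List.intercalate sep (y :: t) := by
  simp [List.intercalate, List.intersperse]

theorem pv_intercalate_singleton {α : Type} (sep u : List α) :
    List.intercalate sep [u] = u := by
  simp [List.intercalate, List.intersperse]

theorem pv_intercalate_snoc {α : Type} (sep u : List α) :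
    ∀ (L : List (List α)), L ≠ [] →
      List.intercalate sep (L ++ [u]) = List.intercalate sep L ++ sep ++ u := by
  intro L
  induction L with
  | nil => intro h; exact absurd rfl h
  | cons x t ih =>
    intro _
    cases t with
    | nil => simp [pv_intercalate_cons_cons, pv_intercalate_singleton]
    | cons y t' =>
      have h := ih (by simp)
      simp only [List.cons_append] at h ⊢
      rw [pv_intercalate_cons_cons sep x y (t' ++ [u]), h,
          pv_intercalate_cons_cons sep x y t']
      simp [List.append_assoc]

theorem pvChunksB_small (s : List Char) (h : s.length ≤ 3) : pvChunksB s = [s] := by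
  rw [pvChunksB, if_neg (by omega)]

theorem pv_main : ∀ (n : Nat) (r : List Char), r.length ≤ n →
    pvFA r = List.intercalate [','] (pvChunksB r.reverse).reverse := by
  intro n
  induction n with
  | zero =>
    intro r hr
    have : r = [] := List.length_eq_zero_iff.mp (Nat.le_zero.mp hr)
    subst this
    simp [pvFA, pvChunksB, List.intercalate]
  | succ n ih =>
    intro r hr
    match r with
    | [] =>
      rw [pvChunksB_small _ (by simp)]
      simp [pvFA, pv_intercalate_singleton]
    | [a] =>
      rw [pvChunksB_small _ (by simp)]
      norm_num [pvFA, PySem.List.enumerate_cons, pvStepA, pv_mod3, pv_intercalate_singleton]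
    | [a, b] =>
      rw [pvChunksB_small _ (by simp)]
      norm_num [pvFA, PySem.List.enumerate_cons, pvStepA, pv_mod3, pv_intercalate_singleton]
    | [a, b, c] =>
      rw [pvChunksB_small _ (by simp)]
      norm_num [pvFA, PySem.List.enumerate_cons, pvStepA, pv_mod3, pv_intercalate_singleton]
    | a :: b :: c :: x :: t =>
      -- left side: peel the first three characters, shift indices
      have hL : pvFA (a :: b :: c :: x :: t)
          = pvFA (x :: t) ++ [','] ++ [c, b, a] := by
        unfold pvFA
        rw [PySem.List.enumerate_cons, PySem.List.enumerate_cons, PySem.List.enumerate_cons]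
        simp only [List.foldl_cons]
        have h1 : pvStepA [] ((0 : Int), a) = [a] := by norm_num [pvStepA]
        have h2 : pvStepA [a] ((0 : Int) + 1, b) = [b, a] := by norm_num [pvStepA, pv_mod3]
        have h3 : pvStepA [b, a] ((0 : Int) + 1 + 1, c) = [c, b, a] := by norm_num [pvStepA, pv_mod3]
        rw [h1, h2, h3, show (0 : Int) + 1 + 1 + 1 = 0 + 3 by ring,
            pv_shift _ _ 0 le_rfl]
        rw [PySem.List.enumerate_cons]
        simp only [List.foldl_cons]
        have h4 : pvStep0 [c, b, a] ((0 : Int), x) = [x, ','] ++ [c, b, a] := by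
          norm_num [pvStep0, pv_mod3]
        rw [h4, pvStep0_out, pv_ge1 _ _ (0 + 1) (by norm_num), pvStepA_out]
        have h5 : pvStepA [] ((0 : Int), x) = [x] := by norm_num [pvStepA]
        rw [h5, pvStepA_out (PySem.List.enumerate t (0 + 1)) [x]]
        simp [List.append_assoc]
      -- right side: the first chunk of the reverse is [c, b, a]
      have hrev : (a :: b :: c :: x :: t).reverse = (x :: t).reverse ++ [c, b, a] := by
        simp
      have hlen : ((x :: t).reverse ++ [c, b, a]).length > 3 := by simp
      have hchunk : pvChunksB ((x :: t).reverse ++ [c, b, a])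
          = [c, b, a] :: pvChunksB (x :: t).reverse := by
        rw [pvChunksB]
        rw [if_pos hlen]
        have hl : ((x :: t).reverse ++ [c, b, a]).length - 3 = (x :: t).reverse.length := by
          simp
        rw [hl, List.drop_left, List.take_left]
      rw [hL, hrev, hchunk, ih (x :: t) (by simp at hr ⊢; omega),
          show (([c, b, a] : List Char) :: pvChunksB (x :: t).reverse).reverse
              = (pvChunksB (x :: t).reverse).reverse ++ [[c, b, a]] by simp,
          pv_intercalate_snoc _ _ _ (by simp [pvChunksB_ne_nil])]

-- ===== VERDICT (by name: the statement is the Claim_ definition above) =====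
theorem generate_comma_patterns_spec : Claim_equal_generate_comma_patterns := by
  intro value _
  unfold Spec_generate_comma_patterns generate_comma_patterns generate_comma_patterns_alt
  by_cases h : value < 1000
  · simp [h]
  · simp only [h, if_false]
    have key := pv_main ((PySem.Int.toStr value).toList.reverse.length)
      ((PySem.Int.toStr value).toList.reverse) le_rfl
    rw [List.reverse_reverse] at key
    simp only [List.nil_append]
    rw [show (fun (formatted : List Char) (ic : Int × Char) =>
          ic.2 :: (if ic.1 > 0 ∧ PySem.Int.mod ic.1 3 = 0 then ',' :: formatted else formatted))
        = pvStepA from rfl]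
    have key' : List.foldl pvStepA [] (PySem.List.enumerate (PySem.Int.toStr value).toList.reverse 0)
        = List.intercalate [','] (pvChunksB (PySem.Int.toStr value).toList).reverse := key
    rw [key']
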